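-- pv_equiv track=rewrite | github.com/danielschnoll/HackerRank-Daily-Challenges | 01-27-2022/greedyLexicalStringOLD.py | morganAndString
-- ===== SOURCE A (Python) =====
-- def helpPop(s_a, s_b):
--     if len(s_a) > 0 and len(s_b) > 0:
--         currA = s_a[0]
--         currB = s_b[0]
--
--         if currA < currB:
--             return "A"
--         elif currB < currA:
--             return "B"
--
--         # Letters are equal, so we'll advance the stack so we peak at the next letter.
--         # The idea is to return the stack that eventually offers the min letter
--         else:
--             return helpPop(s_a[1:], s_b[1:])
--
--     elif len(s_a) > 0 and len(s_b) == 0: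
--         return "A"
--     elif len(s_b) > 0 and len (s_a) == 0:
--         return "B"
--     # strings are equal all the way to the end, choice doesn't matter
--     else:
--         return "A"
--
-- def morganAndString(a, b):
--
--     l = len(a) + len(b)
--     minString = ""
--     a += "z"
--     b += "z"
--
--     for _ in range(l+2):
--
--         ret = helpPop(a, b)
--
--         if ret == "A":
--             minString += a[0]
--             a = a[1:]
--         elif ret == "B":
--             minString += b[0]
--             b = b[1:]
--
--     return minString
-- ===== SOURCE B (Python) =====
-- def _takeA(sa, i, sb, j):
--     # True iff the next character should come from sa: compare the two
--     # suffixes char by char; at the first difference the smaller wins,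
--     # and an exhausted suffix loses (both exhausted -> take from sa).
--     n, m = len(sa), len(sb)
--     while i < n and j < m:
--         if sa[i] != sb[j]:
--             return sa[i] < sb[j]
--         i += 1
--         j += 1
--     return j >= m
--
-- def morganAndString(a, b):
--     sa = a + "z"
--     sb = b + "z"
--     n, m = len(sa), len(sb)
--     i = j = 0
--     out = []
--     while i < n or j < m:
--         if _takeA(sa, i, sb, j):
--             out.append(sa[i])
--             i += 1
--         else:
--             out.append(sb[j])
--             j += 1
--     return "".join(out)
-- ===== Notes on version B (the rewrite author's own statement) =====
-- stated objective: faster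
-- what changed: Replaces A's recursive slice-copying comparison and per-step string slicing/concatenation by an in-place two-pointer merge: indexes into the two fixed strings with a boolean char-by-char suffix comparison and builds the output in a list joined once, so no string copies are ever made.
import Mathlib
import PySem

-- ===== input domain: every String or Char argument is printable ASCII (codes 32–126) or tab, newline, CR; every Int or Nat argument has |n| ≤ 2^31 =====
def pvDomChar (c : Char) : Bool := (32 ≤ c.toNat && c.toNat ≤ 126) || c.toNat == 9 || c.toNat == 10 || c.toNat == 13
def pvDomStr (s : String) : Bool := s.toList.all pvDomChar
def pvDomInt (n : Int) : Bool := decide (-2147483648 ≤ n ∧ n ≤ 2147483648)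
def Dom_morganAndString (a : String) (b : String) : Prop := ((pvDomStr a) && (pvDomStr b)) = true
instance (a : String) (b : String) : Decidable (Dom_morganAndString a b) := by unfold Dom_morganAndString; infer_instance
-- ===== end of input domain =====

-- B replaces A's slice-heavy recursion/"A"/"B" protocol by an index-free two-pointer
-- merge with a boolean suffix comparison (same return value; objective: faster by constant factor).

-- ===== PORT A =====
-- helpPop: recursive suffix comparison on the remaining characters (strings as char lists)
def helpPop : List Char → List Char → String
  | ca :: ta, cb :: tb =>
    if ca < cb then "A"
    else if cb < ca then "B"
    else helpPop ta tb
  | _ :: _, [] => "A"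
  | [], _ :: _ => "B"
  | [], [] => "A"

-- the for-loop of morganAndString: n iterations, state (minString, a, b);
-- the a[0]/b[0] lookup is written as a match (the empty case is never reached
-- for the iteration count A uses).
def morganLoop : Nat → List Char → List Char → List Char → List Char
  | 0, acc, _, _ => acc
  | k + 1, acc, sa, sb =>
    if helpPop sa sb = "A" then
      match sa with
      | c :: ta => morganLoop k (acc ++ [c]) ta sb
      | [] => morganLoop k acc [] sb
    else if helpPop sa sb = "B" then
      match sb with
      | c :: tb => morganLoop k (acc ++ [c]) sa tb
      | [] => morganLoop k acc sa []
    else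
      morganLoop k acc sa sb

def morganAndString (a : String) (b : String) : String :=
  let l := a.toList.length + b.toList.length
  let sa := a.toList ++ ['z']
  let sb := b.toList ++ ['z']
  String.mk (morganLoop (l + 2) [] sa sb)

-- ===== PORT B =====
-- _takeA: two-pointer suffix comparison; the advancing indices become structural
-- recursion on the two remaining suffixes.
def takeA : List Char → List Char → Bool
  | ca :: ta, cb :: tb => if ca ≠ cb then decide (ca < cb) else takeA ta tb
  | _, sb => sb.isEmpty          -- loop exit: take from sa iff sb is exhausted

-- the while-loop of B: pop one char per step from whichever side takeA selects.
def mergeB : List Char → List Char → List Char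
  | [], [] => []
  | [], cb :: tb => cb :: mergeB [] tb
  | ca :: ta, [] => ca :: mergeB ta []
  | ca :: ta, cb :: tb =>
    if takeA (ca :: ta) (cb :: tb) then ca :: mergeB ta (cb :: tb)
    else cb :: mergeB (ca :: ta) tb

def morganAndString_alt (a : String) (b : String) : String :=
  String.mk (mergeB (a.toList ++ ['z']) (b.toList ++ ['z']))

-- ===== PRECONDITION & SPEC =====
def Spec_morganAndString (a : String) (b : String) (out : String) : Prop := out = morganAndString_alt a b
instance (a : String) (b : String) (out : String) : Decidable (Spec_morganAndString a b out) := by unfold Spec_morganAndString; infer_instance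

-- ===== CLAIM (what is proved, stated in full; the proofs are below) =====
def Claim_equal_morganAndString : Prop := ∀ (a : String) (b : String), Dom_morganAndString a b → Spec_morganAndString a b (morganAndString a b)

-- ===== LEMMAS AND PROOFS =====

-- takeA decides exactly when helpPop answers "A"
theorem takeA_eq_helpPop (sa sb : List Char) : takeA sa sb = true ↔ helpPop sa sb = "A" := by
  induction sa generalizing sb with
  | nil =>
    cases sb with
    | nil => simp [takeA, helpPop]
    | cons cb tb => simp [takeA, helpPop]
  | cons ca ta ih =>
    cases sb with
    | nil => simp [takeA, helpPop]
    | cons cb tb =>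
      by_cases h : ca = cb
      · subst h; simpa [takeA, helpPop] using ih tb
      · rcases lt_trichotomy ca cb with hlt | heq | hgt
        · simp [takeA, helpPop, h, hlt]
        · exact absurd heq h
        · have hnlt : ¬ ca < cb := not_lt_of_gt hgt
          simp [takeA, helpPop, h, hnlt, hgt]

theorem helpPop_A_or_B (sa sb : List Char) : helpPop sa sb = "A" ∨ helpPop sa sb = "B" := by
  induction sa generalizing sb with
  | nil => cases sb <;> simp [helpPop]
  | cons ca ta ih =>
    cases sb with
    | nil => simp [helpPop]
    | cons cb tb =>
      by_cases h1 : ca < cb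
      · simp [helpPop, h1]
      · by_cases h2 : cb < ca
        · simp [helpPop, h1, h2]
        · simpa [helpPop, h1, h2] using ih tb

theorem helpPop_A_ne_empty (sa sb : List Char) (h : helpPop sa sb = "A") (hb : sb ≠ []) :
    sa ≠ [] := by
  intro hsa; subst hsa
  cases sb with
  | nil => exact hb rfl
  | cons cb tb => simp [helpPop] at h

theorem helpPop_B_ne_empty (sa sb : List Char) (h : helpPop sa sb = "B") : sb ≠ [] := by
  intro hsb; subst hsb
  cases sa with
  | nil => simp [helpPop] at h
  | cons ca ta => simp [helpPop] at h

-- the loop of A computes B's merge when run for exactly the total length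
theorem morganLoop_eq_mergeB (n : Nat) (acc sa sb : List Char)
    (hn : n = sa.length + sb.length) :
    morganLoop n acc sa sb = acc ++ mergeB sa sb := by
  induction n generalizing acc sa sb with
  | zero =>
    have hsa : sa = [] := List.eq_nil_of_length_eq_zero (by omega)
    have hsb : sb = [] := List.eq_nil_of_length_eq_zero (by omega)
    subst hsa; subst hsb
    simp [morganLoop, mergeB]
  | succ k ih =>
    rcases helpPop_A_or_B sa sb with hA | hB
    · -- "A" branch: sa nonempty (if sb = [] then sa ≠ [] from length)
      have hsa : sa ≠ [] := by
        cases hsb : sb with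
        | nil =>
          subst hsb
          intro h; subst h
          simp at hn
        | cons cb tb => exact helpPop_A_ne_empty sa sb hA (by simp [hsb])
      obtain ⟨ca, ta, rfl⟩ := List.exists_cons_of_ne_nil hsa
      have htake : takeA (ca :: ta) sb = true := (takeA_eq_helpPop _ _).mpr hA
      have hrec : morganLoop (k+1) acc (ca :: ta) sb
          = morganLoop k (acc ++ [ca]) ta sb := by
        simp [morganLoop, hA]
      rw [hrec, ih (acc ++ [ca]) ta sb (by simp at hn; omega)]
      cases sb with
      | nil => simp [mergeB]
      | cons cb tb => simp [mergeB, htake]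
    · -- "B" branch: sb nonempty
      have hsb : sb ≠ [] := helpPop_B_ne_empty sa sb hB
      obtain ⟨cb, tb, rfl⟩ := List.exists_cons_of_ne_nil hsb
      have hne : helpPop sa (cb :: tb) ≠ "A" := by simp [hB]
      have htake : takeA sa (cb :: tb) = false := by
        rcases h : takeA sa (cb :: tb) with _ | _
        · rfl
        · exact absurd ((takeA_eq_helpPop _ _).mp h) hne
      have hrec : morganLoop (k+1) acc sa (cb :: tb)
          = morganLoop k (acc ++ [cb]) sa tb := by
        simp [morganLoop, hB]
      rw [hrec, ih (acc ++ [cb]) sa tb (by simp at hn; omega)]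
      cases sa with
      | nil => simp [mergeB]
      | cons ca ta => simp [mergeB, htake]

-- ===== VERDICT (by name: the statement is the Claim_ definition above) =====
theorem morganAndString_spec : Claim_equal_morganAndString := by
  intro a b _
  show morganAndString a b = morganAndString_alt a b
  show String.mk (morganLoop ((a.toList.length + b.toList.length) + 2) []
      (a.toList ++ ['z']) (b.toList ++ ['z']))
    = String.mk (mergeB (a.toList ++ ['z']) (b.toList ++ ['z']))
  rw [morganLoop_eq_mergeB _ [] _ _ (by simp; omega)]
  simp
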